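-- pv_equiv track=rewrite | github.com/Mandat-Analytic/How-to-Win-Frauen-Bundesliga | src/pipeline.py | rename_wyscout_merged_cols
-- ===== SOURCE A (Python) =====
-- def rename_wyscout_merged_cols(cols):
--     new_cols = []
--     last_base_idx = -1
--     last_base_name = ""
--     for i, c in enumerate(cols):
--         c_str = str(c)
--         if c_str.startswith("Unnamed:") or c_str.strip() == "":
--             if ' / Low / Medium / High' in last_base_name:
--                 base = last_base_name.split(' / ')[0].strip()
--                 offset = i - last_base_idx
--                 if offset == 1: new_cols.append(base + " Low")
--                 elif offset == 2: new_cols.append(base + " Medium")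
--                 elif offset == 3: new_cols.append(base + " High")
--                 else: new_cols.append(c_str)
--             elif 'Penalty area entries' in last_base_name:
--                 base = "Penalty area entries"
--                 offset = i - last_base_idx
--                 if offset == 1: new_cols.append(base + " (runs)")
--                 elif offset == 2: new_cols.append(base + " (crosses)")
--                 else: new_cols.append(c_str)
--             else:
--                 base = last_base_name.split('/')[0].strip().replace("Total ", "").strip()
--                 offset = i - last_base_idx
--                 if offset == 1: new_cols.append(f"Total {base} success")
--                 elif offset == 2: new_cols.append(f"Percentage {base}")
--                 else: new_cols.append(c_str)
--         else:
--             last_base_idx = i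
--             last_base_name = c_str
--             if ' / Low / Medium / High' in c_str:
--                 new_cols.append("Total " + c_str.split(' / ')[0].strip())
--             elif 'Penalty area entries' in c_str:
--                 new_cols.append("Total Penalty area entries")
--             elif '/' in c_str:
--                 base = c_str.split('/')[0].strip()
--                 new_cols.append("Total " + base)
--             else:
--                 new_cols.append(c_str)
--     return new_cols
-- ===== SOURCE B (Python) =====
-- def _is_filler(s):
--     return s.startswith("Unnamed:") or s.strip() == ""
--
-- def _rename_base(s):
--     if ' / Low / Medium / High' in s:
--         return "Total " + s.split(' / ')[0].strip()
--     if 'Penalty area entries' in s: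
--         return "Total Penalty area entries"
--     if '/' in s:
--         return "Total " + s.split('/')[0].strip()
--     return s
--
-- def _rename_filler(base_name, off, s):
--     if ' / Low / Medium / High' in base_name:
--         b = base_name.split(' / ')[0].strip()
--         if off == 1: return b + " Low"
--         if off == 2: return b + " Medium"
--         if off == 3: return b + " High"
--         return s
--     if 'Penalty area entries' in base_name:
--         if off == 1: return "Penalty area entries (runs)"
--         if off == 2: return "Penalty area entries (crosses)"
--         return s
--     b = base_name.split('/')[0].strip().replace("Total ", "").strip()
--     if off == 1: return "Total " + b + " success"
--     if off == 2: return "Percentage " + b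
--     return s
--
-- def rename_wyscout_merged_cols(cols):
--     # pass 1: group the columns into segments: a base header plus the
--     # Unnamed/blank columns it spans (an initial "" base covers leading fillers)
--     segments = []
--     base, fillers = "", []
--     for c in cols:
--         s = str(c)
--         if _is_filler(s):
--             fillers.append(s)
--         else:
--             segments.append((base, fillers))
--             base, fillers = s, []
--     segments.append((base, fillers))
--     # pass 2: emit the renamed headers segment by segment
--     out = []
--     for base, fillers in segments:
--         if base:
--             out.append(_rename_base(base))
--         for off, s in enumerate(fillers, 1):
--             out.append(_rename_filler(base, off, s))
--     return out
-- ===== Notes on version B (the rewrite author's own statement) =====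
-- stated objective: alternative
-- what changed: Replaces A's single stateful flat loop (carrying last_base_idx/last_base_name and computing offsets on the fly) with a two-pass decomposition: one pass groups the columns into (base, spanned Unnamed/blank columns) segments, a second nested pass emits the renamed header per segment using each filler's 1-based position as the offset.
import Mathlib
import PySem

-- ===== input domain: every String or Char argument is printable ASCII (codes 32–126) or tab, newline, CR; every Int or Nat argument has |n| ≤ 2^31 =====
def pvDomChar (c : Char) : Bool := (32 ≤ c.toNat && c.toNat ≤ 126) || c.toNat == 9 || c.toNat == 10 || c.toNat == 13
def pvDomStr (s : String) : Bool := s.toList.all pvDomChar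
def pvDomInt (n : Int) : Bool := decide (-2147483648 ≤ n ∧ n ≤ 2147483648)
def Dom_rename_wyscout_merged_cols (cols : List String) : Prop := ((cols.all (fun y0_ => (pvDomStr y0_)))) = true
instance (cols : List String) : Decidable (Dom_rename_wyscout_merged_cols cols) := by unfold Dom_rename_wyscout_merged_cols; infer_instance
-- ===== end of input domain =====

-- B replaces A's single stateful flat loop (carrying last_base_idx/last_base_name) by a
-- group-building pass into (base, spanned-fillers) segments plus a per-segment emission pass.

-- ===== PORT A =====
-- A's loop body, one state tuple (new_cols, last_base_idx, last_base_name), one (i, c) item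
def pvStepA (st : List String × Int × String) (ic : Int × String) : List String × Int × String :=
  let newCols := st.1
  let lastIdx := st.2.1
  let lastName := st.2.2
  let i := ic.1
  let cstr := ic.2
  if PySem.Str.startswith cstr "Unnamed:" || PySem.Str.strip cstr == "" then
    if PySem.Str.isIn " / Low / Medium / High" lastName then
      let base := PySem.Str.strip (((PySem.Str.split? lastName " / ").getD []).getD 0 "")
      let offset := i - lastIdx
      (newCols ++ [if offset == 1 then base ++ " Low"
                   else if offset == 2 then base ++ " Medium"
                   else if offset == 3 then base ++ " High" else cstr], lastIdx, lastName)
    else if PySem.Str.isIn "Penalty area entries" lastName then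
      let base := "Penalty area entries"
      let offset := i - lastIdx
      (newCols ++ [if offset == 1 then base ++ " (runs)"
                   else if offset == 2 then base ++ " (crosses)" else cstr], lastIdx, lastName)
    else
      let base := PySem.Str.strip (PySem.Str.replace (PySem.Str.strip (((PySem.Str.split? lastName "/").getD []).getD 0 "")) "Total " "")
      let offset := i - lastIdx
      (newCols ++ [if offset == 1 then "Total " ++ base ++ " success"
                   else if offset == 2 then "Percentage " ++ base else cstr], lastIdx, lastName)
  else
    (newCols ++ [if PySem.Str.isIn " / Low / Medium / High" cstr then
                   "Total " ++ PySem.Str.strip (((PySem.Str.split? cstr " / ").getD []).getD 0 "")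
                 else if PySem.Str.isIn "Penalty area entries" cstr then
                   "Total Penalty area entries"
                 else if PySem.Str.isIn "/" cstr then
                   "Total " ++ PySem.Str.strip (((PySem.Str.split? cstr "/").getD []).getD 0 "")
                 else cstr], i, cstr)

def rename_wyscout_merged_cols (cols : List String) : List String :=
  ((PySem.List.enumerate cols 0).foldl pvStepA ([], -1, "")).1

-- ===== PORT B =====
def pvIsFill (s : String) : Bool :=
  PySem.Str.startswith s "Unnamed:" || PySem.Str.strip s == ""

def pvRenameBase (s : String) : String :=
  if PySem.Str.isIn " / Low / Medium / High" s then
    "Total " ++ PySem.Str.strip (((PySem.Str.split? s " / ").getD []).getD 0 "")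
  else if PySem.Str.isIn "Penalty area entries" s then
    "Total Penalty area entries"
  else if PySem.Str.isIn "/" s then
    "Total " ++ PySem.Str.strip (((PySem.Str.split? s "/").getD []).getD 0 "")
  else s

def pvRenameFill (b : String) (off : Int) (s : String) : String :=
  if PySem.Str.isIn " / Low / Medium / High" b then
    let x := PySem.Str.strip (((PySem.Str.split? b " / ").getD []).getD 0 "")
    if off == 1 then x ++ " Low"
    else if off == 2 then x ++ " Medium"
    else if off == 3 then x ++ " High" else s
  else if PySem.Str.isIn "Penalty area entries" b then
    if off == 1 then "Penalty area entries (runs)"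
    else if off == 2 then "Penalty area entries (crosses)" else s
  else
    let x := PySem.Str.strip (PySem.Str.replace (PySem.Str.strip (((PySem.Str.split? b "/").getD []).getD 0 "")) "Total " "")
    if off == 1 then "Total " ++ x ++ " success"
    else if off == 2 then "Percentage " ++ x else s

-- pass 1: group the columns into (base, spanned fillers) segments
def pvBuildSegs : List String → String → List String → List (String × List String)
  | [], b, fs => [(b, fs)]
  | c :: rest, b, fs =>
    if pvIsFill c then pvBuildSegs rest b (fs ++ [c])
    else (b, fs) :: pvBuildSegs rest c []

-- the 'for off, s in enumerate(fillers, 1)' loop, start offset generalized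
def pvMapFill (b : String) (off : Int) : List String → List String
  | [] => []
  | s :: rest => pvRenameFill b off s :: pvMapFill b (off + 1) rest

-- pass 2: one segment's output
def pvEmitSeg (seg : String × List String) : List String :=
  (if seg.1 ≠ "" then [pvRenameBase seg.1] else []) ++ pvMapFill seg.1 1 seg.2

def rename_wyscout_merged_cols_alt (cols : List String) : List String :=
  (pvBuildSegs cols "" []).flatMap pvEmitSeg

-- ===== PRECONDITION & SPEC =====
def Spec_rename_wyscout_merged_cols (cols : List String) (out : List String) : Prop := out = rename_wyscout_merged_cols_alt cols
instance (cols : List String) (out : List String) : Decidable (Spec_rename_wyscout_merged_cols cols out) := by unfold Spec_rename_wyscout_merged_cols; infer_instance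

-- ===== CLAIM (what is proved, stated in full; the proofs are below) =====
def Claim_equal_rename_wyscout_merged_cols : Prop := ∀ (cols : List String), Dom_rename_wyscout_merged_cols cols → Spec_rename_wyscout_merged_cols cols (rename_wyscout_merged_cols cols)

-- ===== LEMMAS AND PROOFS =====

-- common normal form of both programs: remaining columns, current base, fillers consumed so far
def pvSpecGo : List String → String → Int → List String
  | [], _, _ => []
  | c :: rest, b, o =>
    if pvIsFill c then pvRenameFill b (o + 1) c :: pvSpecGo rest b (o + 1)
    else pvRenameBase c :: pvSpecGo rest c 0

theorem pvStepA_filler (st : List String × Int × String) (i : Int) (c : String)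
    (h : pvIsFill c = true) :
    pvStepA st (i, c) = (st.1 ++ [pvRenameFill st.2.2 (i - st.2.1) c], st.2.1, st.2.2) := by
  simp only [pvIsFill] at h
  simp only [pvStepA, pvRenameFill, h, if_true]
  split_ifs <;> rfl

theorem pvStepA_base (st : List String × Int × String) (i : Int) (c : String)
    (h : pvIsFill c = false) :
    pvStepA st (i, c) = (st.1 ++ [pvRenameBase c], i, c) := by
  simp only [pvIsFill] at h
  simp only [pvStepA, pvRenameBase, h, Bool.false_eq_true, if_false]

theorem pvA_go (cols : List String) : ∀ (s lastIdx : Int) (b : String) (acc : List String),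
    ((PySem.List.enumerate cols s).foldl pvStepA (acc, lastIdx, b)).1
      = acc ++ pvSpecGo cols b (s - lastIdx - 1) := by
  induction cols with
  | nil => intro s lastIdx b acc; simp [PySem.List.enumerate_nil, pvSpecGo]
  | cons c rest ih =>
    intro s lastIdx b acc
    rw [PySem.List.enumerate_cons, List.foldl_cons]
    by_cases h : pvIsFill c = true
    · rw [pvStepA_filler _ _ _ h, ih]
      simp only [pvSpecGo, h, if_true]
      have h1 : s + 1 - lastIdx - 1 = (s - lastIdx - 1) + 1 := by ring
      rw [h1]
      have h3 : s - lastIdx = (s - lastIdx - 1) + 1 := by ring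
      rw [h3]
      simp
    · rw [pvStepA_base _ _ _ (Bool.eq_false_iff.mpr h), ih]
      simp only [pvSpecGo, h, Bool.false_eq_true, if_false]
      have h1 : s + 1 - s - 1 = 0 := by ring
      rw [h1]
      simp

theorem pvMapFill_append (b : String) (c : String) : ∀ (xs : List String) (o : Int),
    pvMapFill b o (xs ++ [c]) = pvMapFill b o xs ++ [pvRenameFill b (o + xs.length) c] := by
  intro xs
  induction xs with
  | nil => intro o; simp [pvMapFill]
  | cons x t ih =>
    intro o
    simp only [List.cons_append, pvMapFill, ih (o + 1), List.length_cons]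
    have : o + 1 + (t.length : Int) = o + ((t.length : Int) + 1) := by ring
    rw [this]
    push_cast
    ring_nf

theorem pvIsFill_ne_empty {c : String} (h : pvIsFill c = false) : c ≠ "" := by
  intro hc; subst hc; exact absurd h (by decide)

theorem pvB_go (cols : List String) : ∀ (b : String) (fs : List String),
    (pvBuildSegs cols b fs).flatMap pvEmitSeg
      = (if b ≠ "" then [pvRenameBase b] else []) ++ pvMapFill b 1 fs
          ++ pvSpecGo cols b fs.length := by
  induction cols with
  | nil =>
    intro b fs
    simp [pvBuildSegs, pvEmitSeg, pvSpecGo]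
  | cons c rest ih =>
    intro b fs
    by_cases h : pvIsFill c = true
    · simp only [pvBuildSegs, h, if_true]
      rw [ih b (fs ++ [c]), pvMapFill_append]
      simp only [pvSpecGo, h, if_true, List.length_append, List.length_cons,
        List.length_nil]
      have h1 : (1 : Int) + fs.length = (fs.length : Int) + 1 := by ring
      have h2 : ((fs.length + 1 : Nat) : Int) = (fs.length : Int) + 1 := by push_cast; ring
      rw [h1, h2]
      simp [List.append_assoc]
    · simp only [pvBuildSegs, h, Bool.false_eq_true, if_false, List.flatMap_cons]
      rw [ih c []]
      have hc : c ≠ "" := pvIsFill_ne_empty (Bool.eq_false_iff.mpr h ▸ rfl)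
      simp only [pvSpecGo, h, Bool.false_eq_true, if_false, pvEmitSeg, pvMapFill]
      rw [if_pos hc]
      simp [List.append_assoc]

-- ===== VERDICT (by name: the statement is the Claim_ definition above) =====
theorem rename_wyscout_merged_cols_spec : Claim_equal_rename_wyscout_merged_cols := by
  intro cols _
  show rename_wyscout_merged_cols cols = rename_wyscout_merged_cols_alt cols
  rw [rename_wyscout_merged_cols, rename_wyscout_merged_cols_alt, pvA_go, pvB_go]
  norm_num [pvMapFill]
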